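-- pv_equiv track=rewrite | github.com/carnival77/Algorithm_Practice | Codility/Test_251016/3/3.py | solution
-- ===== SOURCE A (Python) =====
-- from collections import defaultdict
--
-- def solution(A, B):
--     n = len(A)
--
--     # 값 x -> x를 선택할 수 있는 인덱스들의 목록
--     pos = defaultdict(list)
--     for i in range(n):
--         x, y = A[i], B[i]
--         if x > 0:
--             pos[x].append(i)
--         if y > 0 and y != x:
--             pos[y].append(i)
--
--     # 강제 m 존재 여부: 어떤 i에서 (A[i]==m and B[i]==m)
--     def has_forced_m(m):
--         for i in range(n):
--             if A[i] == m and B[i] == m: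
--                 return True
--         return False
--
--     # 이분 매칭: 왼쪽(숫자 x) -> 오른쪽(인덱스 i)
--     # matchR[i] = 이 인덱스 i에 매칭된 숫자 x (없으면 -1)
--     def can_cover_all_upto(m):
--         matchR = [-1] * n
--
--         # DFS로 증대 경로 탐색 (Kuhn 알고리즘)
--         def dfs(x, seen):
--             if x not in pos:
--                 return False
--             for i in pos[x]:
--                 if seen[i]:
--                     continue
--                 seen[i] = True
--                 if matchR[i] == -1 or dfs(matchR[i], seen):
--                     matchR[i] = x
--                     return True
--             return False
--
--         for x in range(1, m):
--             # 각 x를 배정하기 위한 방문배열 초기화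
--             seen = [False] * n
--             if not dfs(x, seen):
--                 return False
--         return True
--
--     # m은 1..N+1 범위에서만 보면 충분
--     m = 1
--     while m <= n + 1:
--         # 1) 강제 m이 있으면 이 m은 절대 불가
--         if has_forced_m(m):
--             m += 1
--             continue
--
--         # 2) 존재성 검사: 1..m-1 중 pos[x]가 비면 MEX는 그 x
--         missing_x = 0
--         for x in range(1, m):
--             if x not in pos or len(pos[x]) == 0:
--                 missing_x = x
--                 break
--         if missing_x != 0:
--             return missing_x
--
--         # 3) 최대 매칭으로 1..m-1 모두 커버 가능?
--         if can_cover_all_upto(m):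
--             return m
--
--         m += 1
--
--     # 이론상 도달하지 않음(반드시 1..N+1에서 결정)
--     return n + 2
-- ===== SOURCE B (Python) =====
-- def solution(A, B):
--     # Answer = smallest positive integer m such that no index i forces m
--     # (A[i] == B[i] == m).  Any wholly-forced prefix 1..m-1 is always
--     # coverable by matching each forced value to its own index, so the
--     # bipartite-matching search of the original always succeeds exactly
--     # at the first non-forced m.
--     forced = {x for x, y in zip(A, B) if x == y}
--     m = 1
--     while m in forced:
--         m += 1
--     return m
-- ===== Notes on version B (the rewrite author's own statement) =====
-- stated objective: faster
-- what changed: Replaced the whole m-loop with Kuhn bipartite matching by a single pass computing the mex of the forced values {v : A[i]==B[i]==v}, using the theorem (proved in Lean) that a wholly forced prefix 1..m-1 is always coverable, so A returns exactly the first non-forced m.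
import Mathlib
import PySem

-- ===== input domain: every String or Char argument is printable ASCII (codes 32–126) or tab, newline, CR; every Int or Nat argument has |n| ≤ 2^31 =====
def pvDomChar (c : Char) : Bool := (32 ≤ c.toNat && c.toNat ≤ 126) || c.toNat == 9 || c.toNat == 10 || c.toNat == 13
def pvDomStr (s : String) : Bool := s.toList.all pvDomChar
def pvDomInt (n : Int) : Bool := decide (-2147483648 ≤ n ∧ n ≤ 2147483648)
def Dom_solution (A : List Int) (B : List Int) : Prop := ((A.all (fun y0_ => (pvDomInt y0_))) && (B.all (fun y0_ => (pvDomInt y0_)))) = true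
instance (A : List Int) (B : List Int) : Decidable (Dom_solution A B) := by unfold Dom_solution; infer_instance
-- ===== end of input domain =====

-- B replaces A's repeated bipartite-matching search by a single pass returning the mex of
-- the forced values {v : A[i]==B[i]==v}; the proof shows A's matching always succeeds
-- exactly at the first non-forced m.

-- ===== PORT A =====
-- Internal loop counters of A (Python's `for i in range(n)`) are kept as Nat; element reads
-- A[i]/B[i] use getD at indices 0 ≤ i < len, where it is exact.
def buildPos (A B : List Int) : PySem.Dict Int (List Nat) :=
  (List.range A.length).foldl
    (fun d i =>
      let x := A.getD i 0
      let y := B.getD i 0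
      let d1 := if 0 < x then d.modify x [] (fun l => l ++ [i]) else d
      if 0 < y ∧ y ≠ x then d1.modify y [] (fun l => l ++ [i]) else d1)
    PySem.Dict.empty

def hasForced (A B : List Int) (m : Int) : Bool :=
  (List.range A.length).any (fun i => A.getD i 0 == m && B.getD i 0 == m)

-- `for x in range(1,m): if x not in pos or len(pos[x])==0: missing_x = x; break`
def findMissing (pos : PySem.Dict Int (List Nat)) (m : Int) : Int :=
  match (PySem.List.pyRange 1 m 1).find?
      (fun x => !pos.contains x || (pos.getD x []).length == 0) with
  | some x => x
  | none => 0

mutual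
-- A's recursive dfs; fuel only bounds the recursion depth (the top call passes n+1,
-- which provably never runs out: each nested call has marked one more `seen` entry).
def dfsA (pos : PySem.Dict Int (List Nat)) (fuel : Nat) (x : Int)
    (seen : List Bool) (mr : List Int) : Bool × List Bool × List Int :=
  match fuel with
  | 0 => (false, seen, mr)
  | fuel' + 1 =>
    if pos.contains x then dfsL pos fuel' (pos.getD x []) x seen mr
    else (false, seen, mr)
  termination_by (fuel, 0, 0)

-- the `for i in pos[x]` loop inside dfs
def dfsL (pos : PySem.Dict Int (List Nat)) (fuel : Nat) (l : List Nat) (x : Int)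
    (seen : List Bool) (mr : List Int) : Bool × List Bool × List Int :=
  match l with
  | [] => (false, seen, mr)
  | i :: rest =>
    if seen.getD i false then dfsL pos fuel rest x seen mr
    else
      let seen1 := seen.set i true
      if mr.getD i (-1) = -1 then (true, seen1, mr.set i x)
      else
        match dfsA pos fuel (mr.getD i (-1)) seen1 mr with
        | (true, seen2, mr2) => (true, seen2, mr2.set i x)
        | (false, seen2, mr2) => dfsL pos fuel rest x seen2 mr2
  termination_by (fuel, 1, l.length)
end

-- `for x in range(1, m): seen = [False]*n; if not dfs(x, seen): return False`
def canCoverGo (pos : PySem.Dict Int (List Nat)) (n : Nat) : List Int → List Int → Bool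
  | [], _ => true
  | x :: rest, mr =>
    match dfsA pos (n + 1) x (List.replicate n false) mr with
    | (true, _, mr2) => canCoverGo pos n rest mr2
    | (false, _, _) => false

def canCover (A B : List Int) (pos : PySem.Dict Int (List Nat)) (m : Int) : Bool :=
  canCoverGo pos A.length (PySem.List.pyRange 1 m 1) (List.replicate A.length (-1))

-- `while m <= n + 1`, started at m = 1 with fuel n+1; fuel 0 is the loop exit `return n+2`
def solutionLoop (A B : List Int) (pos : PySem.Dict Int (List Nat)) : Nat → Int → Int
  | 0, _ => (A.length : Int) + 2
  | fuel + 1, m =>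
    if hasForced A B m then solutionLoop A B pos fuel (m + 1)
    else
      let miss := findMissing pos m
      if miss ≠ 0 then miss
      else if canCover A B pos m then m
      else solutionLoop A B pos fuel (m + 1)

def solution (A : List Int) (B : List Int) : Int :=
  solutionLoop A B (buildPos A B) (A.length + 1) 1

-- ===== PORT B =====
-- forced = {x for x, y in zip(A, B) if x == y}
def forcedOf (A B : List Int) : PySem.Set Int :=
  PySem.Set.ofList ((A.zip B).filterMap (fun p => if p.1 == p.2 then some p.1 else none))

-- `while m in forced: m += 1`; fuel |forced|+1 provably suffices (each step consumes a member)
def altLoop (s : PySem.Set Int) : Nat → Int → Int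
  | 0, m => m
  | k + 1, m => if PySem.Set.contains s m then altLoop s k (m + 1) else m

def solution_alt (A : List Int) (B : List Int) : Int :=
  altLoop (forcedOf A B) ((forcedOf A B).length + 1) 1

-- ===== PRECONDITION & SPEC =====
-- A reads B[i] for every i < len(A): with len(B) < len(A) it raises IndexError.
def Pre_solution (A : List Int) (B : List Int) : Prop := A.length ≤ B.length
instance (A : List Int) (B : List Int) : Decidable (Pre_solution A B) := by
  unfold Pre_solution; infer_instance
def pvWitness_solution : List Int × List Int := ([1, 1, 3], [1, 2, 3])

def Spec_solution (A : List Int) (B : List Int) (out : Int) : Prop := out = solution_alt A B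
instance (A : List Int) (B : List Int) (out : Int) : Decidable (Spec_solution A B out) := by
  unfold Spec_solution; infer_instance

-- ===== CLAIM (what is proved, stated in full; the proofs are below) =====
def Claim_equal_solution : Prop := ∀ (A : List Int) (B : List Int), Dom_solution A B → Pre_solution A B → Spec_solution A B (solution A B)

-- ===== LEMMAS AND PROOFS =====

def sg (s : List Bool) (i : Nat) : Bool := s.getD i false
def mg (mr : List Int) (i : Nat) : Int := mr.getD i (-1)

lemma sg_set_self (s : List Bool) (i : Nat) (h : i < s.length) : sg (s.set i true) i = true := by
  simp [sg, List.getD, h]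

lemma sg_set_ne (s : List Bool) (i j : Nat) (h : j ≠ i) : sg (s.set i true) j = sg s j := by
  simp [sg, List.getD, List.getElem?_set_ne (Ne.symm h)]

lemma sg_set_mono (s : List Bool) (i k : Nat) (h : sg s k = true) : sg (s.set i true) k = true := by
  by_cases hk : k = i
  · subst hk
    by_cases hlen : k < s.length
    · exact sg_set_self s k hlen
    · rw [List.set_eq_of_length_le (by omega)]; exact h
  · rw [sg_set_ne s i k hk]; exact h

lemma mg_set_self (mr : List Int) (i : Nat) (v : Int) (h : i < mr.length) : mg (mr.set i v) i = v := by
  simp [mg, List.getD, h]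

lemma mg_set_ne (mr : List Int) (i j : Nat) (v : Int) (h : j ≠ i) : mg (mr.set i v) j = mg mr j := by
  simp [mg, List.getD, List.getElem?_set_ne (Ne.symm h)]

lemma sg_replicate (n i : Nat) : sg (List.replicate n false) i = false := by
  simp [sg, List.getD]

lemma getD_mem_of_lt {α : Type} (l : List α) (i : Nat) (d : α) (h : i < l.length) : l.getD i d ∈ l := by
  rw [List.getD_eq_getElem l d h]; exact List.getElem_mem h

lemma count_set_add {α : Type} [BEq α] [LawfulBEq α] (l : List α) (i : Nat) (v w : α) (h : i < l.length) :
    (l.set i v).count w + (if l[i] == w then 1 else 0) = l.count w + (if v == w then 1 else 0) := by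
  induction l generalizing i with
  | nil => simp at h
  | cons a t ih =>
    cases i with
    | zero => simp only [List.set_cons_zero, List.count_cons, List.getElem_cons_zero]; split_ifs <;> omega
    | succ i =>
      have := ih i (by simpa using h)
      simp only [List.set_cons_succ, List.count_cons, List.getElem_cons_succ]
      split_ifs at * <;> omega

lemma count_true_set (s : List Bool) (i : Nat) (h : i < s.length) (h2 : sg s i = false) :
    (s.set i true).count true = s.count true + 1 := by
  have hadd := count_set_add s i true true h
  have hg : s[i] = false := by
    have := List.getD_eq_getElem s false h
    rw [← this]; exact h2
  simp [hg] at hadd; omega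

lemma count_true_mono : ∀ (s t : List Bool), s.length = t.length →
    (∀ i, sg s i = true → sg t i = true) → s.count true ≤ t.count true := by
  intro s
  induction s with
  | nil => simp
  | cons a s ih =>
    intro t hlen hp
    cases t with
    | nil => simp at hlen
    | cons b t =>
      have h0 := hp 0
      have hrec := ih t (by simpa using hlen) (fun i hi => by
        have := hp (i + 1)
        simp only [sg, List.getD_cons_succ] at this
        exact this (by simpa only [sg, List.getD_cons_succ] using hi))
      simp only [sg, List.getD_cons_zero] at h0
      cases a <;> cases b <;> (try simp_all) <;> omega

lemma two_le_count {α : Type} [BEq α] [LawfulBEq α] :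
    ∀ (l : List α) (v d : α) (i j : Nat), i < l.length → j < l.length → i ≠ j →
      l.getD i d = v → l.getD j d = v → 2 ≤ l.count v := by
  intro l
  induction l with
  | nil => intro v d i j hi; simp at hi
  | cons a t ih =>
    intro v d i j hi hj hne h1 h2
    match i, j with
    | 0, 0 => omega
    | 0, j+1 =>
      have ha : a = v := by simpa [List.getD] using h1
      have hmem : v ∈ t := by
        have hd : t.getD j d = v := by simpa [List.getD_cons_succ] using h2
        rw [← hd]; exact getD_mem_of_lt t j d (by simpa using hj)
      have := List.count_pos_iff.mpr hmem
      simp [ha]; omega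
    | i+1, 0 =>
      have ha : a = v := by simpa [List.getD] using h2
      have hmem : v ∈ t := by
        have hd : t.getD i d = v := by simpa [List.getD_cons_succ] using h1
        rw [← hd]; exact getD_mem_of_lt t i d (by simpa using hi)
      have := List.count_pos_iff.mpr hmem
      simp [ha]; omega
    | i+1, j+1 =>
      have := ih v d i j (by simpa using hi) (by simpa using hj) (by omega)
        (by simpa [List.getD_cons_succ] using h1) (by simpa [List.getD_cons_succ] using h2)
      simp [List.count_cons]; omega
lemma count_set_new (l : List Int) (i : Nat) (h : i < l.length) (v w : Int)
    (hold : l[i] ≠ w) (hnew : v = w) : (l.set i v).count w = l.count w + 1 := by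
  have := count_set_add l i v w h
  simp only [beq_iff_eq] at this
  rw [if_neg hold, if_pos hnew] at this
  omega

lemma count_set_keep (l : List Int) (i : Nat) (h : i < l.length) (v w : Int)
    (hold : l[i] ≠ w) (hnew : v ≠ w) : (l.set i v).count w = l.count w := by
  have := count_set_add l i v w h
  simp only [beq_iff_eq] at this
  rw [if_neg hold, if_neg hnew] at this
  omega

lemma count_set_drop (l : List Int) (i : Nat) (h : i < l.length) (v w : Int)
    (hold : l[i] = w) (hnew : v ≠ w) : (l.set i v).count w + 1 = l.count w := by
  have := count_set_add l i v w h
  simp only [beq_iff_eq] at this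
  rw [if_pos hold, if_neg hnew] at this
  omega
def predB (A B : List Int) (x : Int) (i : Nat) : Bool :=
  decide (0 < x) && (A.getD i 0 == x || (B.getD i 0 == x && !(A.getD i 0 == x)))

def posStep (A B : List Int) (d : PySem.Dict Int (List Nat)) (i : Nat) : PySem.Dict Int (List Nat) :=
  let x := A.getD i 0
  let y := B.getD i 0
  let d1 := if 0 < x then d.modify x [] (fun l => l ++ [i]) else d
  if 0 < y ∧ y ≠ x then d1.modify y [] (fun l => l ++ [i]) else d1

lemma buildPos_eq (A B : List Int) :
    buildPos A B = (List.range A.length).foldl (posStep A B) PySem.Dict.empty := rfl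

lemma posStep_getD (A B : List Int) (x : Int) (k : Nat) (d : PySem.Dict Int (List Nat))
    (ih1 : d.getD x [] = (List.range k).filter (predB A B x)) :
    (posStep A B d k).getD x [] = (List.range k).filter (predB A B x)
        ++ (if predB A B x k then [k] else []) := by
  simp only [posStep]
  split_ifs with h2 h1 h1
  all_goals try simp only [PySem.Dict.getD_modify]
  all_goals (
    by_cases hxa : x = A.getD k 0 <;> by_cases hxb : x = B.getD k 0 <;>
      simp_all [predB, beq_iff_eq, beq_eq_decide] <;> try omega)

lemma posStep_contains (A B : List Int) (x : Int) (k : Nat) (d : PySem.Dict Int (List Nat))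
    (ih2 : d.contains x = !((List.range k).filter (predB A B x)).isEmpty) :
    (posStep A B d k).contains x
      = !(((List.range k).filter (predB A B x)) ++ (if predB A B x k then [k] else [])).isEmpty := by
  simp only [posStep]
  split_ifs with h2 h1 h1
  all_goals try simp only [PySem.Dict.contains_modify]
  all_goals (
    by_cases hxa : x = A.getD k 0 <;> by_cases hxb : x = B.getD k 0 <;>
      simp_all [predB, beq_iff_eq, beq_eq_decide] <;> try omega)

lemma buildPos_spec (A B : List Int) (x : Int) : ∀ k : Nat,
    ((List.range k).foldl (posStep A B) PySem.Dict.empty).getD x []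
        = (List.range k).filter (predB A B x) ∧
    ((List.range k).foldl (posStep A B) PySem.Dict.empty).contains x
        = !((List.range k).filter (predB A B x)).isEmpty := by
  intro k
  induction k with
  | zero => simp [PySem.Dict.getD_empty, PySem.Dict.contains_empty]
  | succ k ih =>
    obtain ⟨ih1, ih2⟩ := ih
    rw [List.range_succ, List.foldl_append, List.filter_append]
    simp only [List.foldl_cons, List.foldl_nil, List.filter_cons, List.filter_nil]
    constructor
    · rw [posStep_getD A B x k _ ih1]
    · rw [posStep_contains A B x k _ ih2]

lemma buildPos_getD (A B : List Int) (x : Int) :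
    (buildPos A B).getD x [] = (List.range A.length).filter (predB A B x) := by
  rw [buildPos_eq]; exact (buildPos_spec A B x A.length).1

lemma buildPos_contains (A B : List Int) (x : Int) :
    (buildPos A B).contains x = !((List.range A.length).filter (predB A B x)).isEmpty := by
  rw [buildPos_eq]; exact (buildPos_spec A B x A.length).2

lemma mem_buildPos (A B : List Int) (x : Int) (i : Nat) :
    i ∈ (buildPos A B).getD x [] ↔ i < A.length ∧ predB A B x i = true := by
  rw [buildPos_getD]; simp [List.mem_filter]
lemma sg_set_cases (s : List Bool) (i k : Nat) (h : sg (s.set i true) k = true) :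
    k = i ∨ sg s k = true := by
  by_cases hk : k = i
  · exact Or.inl hk
  · right; rw [← sg_set_ne s i k hk]; exact h

def FailA (pos : PySem.Dict Int (List Nat)) (n fuel : Nat) : Prop :=
  ∀ (x : Int) (seen : List Bool) (mr : List Int) (s' : List Bool) (mr' : List Int),
    seen.length = n → n + 1 ≤ fuel + seen.count true →
    dfsA pos fuel x seen mr = (false, s', mr') →
    mr' = mr ∧ s'.length = n ∧ (∀ i, sg seen i = true → sg s' i = true) ∧
    (∀ j ∈ pos.getD x [], sg s' j = true) ∧
    (∀ i, sg s' i = true → sg seen i = true ∨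
      (mg mr i ≠ -1 ∧ ∀ j ∈ pos.getD (mg mr i) [], sg s' j = true))

def FailL (pos : PySem.Dict Int (List Nat)) (n fuel : Nat) : Prop :=
  ∀ (l : List Nat) (x : Int) (seen : List Bool) (mr : List Int) (s' : List Bool) (mr' : List Int),
    (∀ i ∈ l, i < n) → seen.length = n → n + 1 ≤ fuel + 1 + seen.count true →
    dfsL pos fuel l x seen mr = (false, s', mr') →
    mr' = mr ∧ s'.length = n ∧ (∀ i, sg seen i = true → sg s' i = true) ∧
    (∀ j ∈ l, sg s' j = true) ∧
    (∀ i, sg s' i = true → sg seen i = true ∨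
      (mg mr i ≠ -1 ∧ ∀ j ∈ pos.getD (mg mr i) [], sg s' j = true))

lemma failA_zero (pos : PySem.Dict Int (List Nat)) (n : Nat) : FailA pos n 0 := by
  intro x seen mr s' mr' hlen hfuel _
  have := List.count_le_length (l := seen) (a := true)
  omega

lemma failL_step (pos : PySem.Dict Int (List Nat)) (n fuel : Nat)
    (hA : FailA pos n fuel) : FailL pos n fuel := by
  intro l
  induction l with
  | nil =>
    intro x seen mr s' mr' _ hlen _ hrun
    rw [dfsL] at hrun
    obtain ⟨rfl, rfl⟩ : s' = seen ∧ mr' = mr :=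
      ⟨(congrArg (fun p => p.2.1) hrun).symm, (congrArg (fun p => p.2.2) hrun).symm⟩
    exact ⟨rfl, hlen, fun _ h => h, by simp, fun i hi => Or.inl hi⟩
  | cons i rest ih =>
    intro x seen mr s' mr' hl hlen hfuel hrun
    have hin : i < n := hl i (by simp)
    by_cases hseen : sg seen i = true
    · rw [dfsL] at hrun
      rw [if_pos (by exact hseen)] at hrun
      obtain ⟨hmr, hs'len, hmono, hrest, hclose⟩ :=
        ih x seen mr s' mr' (fun j hj => hl j (by simp [hj])) hlen hfuel hrun
      refine ⟨hmr, hs'len, hmono, ?_, hclose⟩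
      intro j hj
      rcases List.mem_cons.mp hj with rfl | hj
      · exact hmono j hseen
      · exact hrest j hj
    · rw [dfsL] at hrun
      rw [if_neg (by simpa [sg] using hseen)] at hrun
      simp only [] at hrun
      by_cases hfree : mg mr i = -1
      · rw [if_pos (by exact hfree)] at hrun
        exact absurd (congrArg Prod.fst hrun) (by simp)
      · rw [if_neg (by exact hfree)] at hrun
        rcases hdfs : dfsA pos fuel (mr.getD i (-1)) (seen.set i true) mr with ⟨b2, s2, m2⟩
        rw [hdfs] at hrun
        cases b2
        · -- subcall failed; continue over rest from s2
          simp only [] at hrun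
          have hcnt1 : (seen.set i true).count true = seen.count true + 1 :=
            count_true_set seen i (by omega) (by simpa using hseen)
          obtain ⟨hm2, hs2len, hmono2, hposz, hclose2⟩ :=
            hA (mr.getD i (-1)) (seen.set i true) mr s2 m2 (by simp [hlen]) (by omega) hdfs
          rw [hm2] at hrun
          have hcnt2 : (seen.set i true).count true ≤ s2.count true :=
            count_true_mono _ _ (by simp [hlen, hs2len]) hmono2
          obtain ⟨hmr, hs'len, hmono3, hrest, hclose3⟩ :=
            ih x s2 mr s' mr' (fun j hj => hl j (by simp [hj])) hs2len (by omega) hrun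
          have hmonoAll : ∀ k, sg seen k = true → sg s' k = true := fun k hk =>
            hmono3 k (hmono2 k (sg_set_mono seen i k hk))
          refine ⟨hmr, hs'len, hmonoAll, ?_, ?_⟩
          · intro j hj
            rcases List.mem_cons.mp hj with rfl | hj
            · exact hmono3 j (hmono2 j (sg_set_self seen j (by omega)))
            · exact hrest j hj
          · intro k hk
            rcases hclose3 k hk with hk2 | hk2
            · rcases hclose2 k hk2 with hk1 | hk1
              · rcases sg_set_cases seen i k hk1 with rfl | hk0
                · right
                  refine ⟨hfree, fun j hj => hmono3 j (hposz j ?_)⟩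
                  simpa [mg] using hj
                · exact Or.inl hk0
              · exact Or.inr ⟨hk1.1, fun j hj => hmono3 j (hk1.2 j hj)⟩
            · exact Or.inr hk2
        · exact absurd (congrArg Prod.fst hrun) (by simp)

lemma failA_step (pos : PySem.Dict Int (List Nat)) (n fuel : Nat)
    (hpos : ∀ (v : Int) (i : Nat), i ∈ pos.getD v [] → i < n)
    (hL : FailL pos n fuel) : FailA pos n (fuel + 1) := by
  intro x seen mr s' mr' hlen hfuel hrun
  rw [dfsA] at hrun
  by_cases hc : pos.contains x = true
  · rw [if_pos hc] at hrun
    obtain ⟨hmr, hs'len, hmono, hall, hclose⟩ :=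
      hL (pos.getD x []) x seen mr s' mr' (fun i hi => hpos x i hi) hlen (by omega) hrun
    exact ⟨hmr, hs'len, hmono, hall, hclose⟩
  · rw [if_neg hc] at hrun
    obtain ⟨rfl, rfl⟩ : s' = seen ∧ mr' = mr := by
      have h1 := congrArg (fun p => p.2.1) hrun
      have h2 := congrArg (fun p => p.2.2) hrun
      exact ⟨h1.symm, h2.symm⟩
    have hempty : pos.getD x [] = [] :=
      PySem.Dict.getD_of_not_contains pos [] (by simpa using hc)
    exact ⟨rfl, hlen, fun _ h => h, by simp [hempty], fun i hi => Or.inl hi⟩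

lemma failSpec (pos : PySem.Dict Int (List Nat)) (n : Nat)
    (hpos : ∀ (v : Int) (i : Nat), i ∈ pos.getD v [] → i < n) :
    ∀ fuel, FailA pos n fuel ∧ FailL pos n fuel := by
  intro fuel
  induction fuel with
  | zero => exact ⟨failA_zero pos n, failL_step pos n 0 (failA_zero pos n)⟩
  | succ fuel ih =>
    have hA := failA_step pos n fuel hpos ih.2
    exact ⟨hA, failL_step pos n (fuel + 1) hA⟩
def edgeP (A B : List Int) (v : Int) (i : Nat) : Prop := A.getD i 0 = v ∨ B.getD i 0 = v

lemma mg_eq_getElem (mr : List Int) (i : Nat) (h : i < mr.length) : mg mr i = mr[i] :=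
  List.getD_eq_getElem mr (-1) h

def SuccA (A B : List Int) (pos : PySem.Dict Int (List Nat)) (n fuel : Nat) : Prop :=
  ∀ (x : Int) (seen : List Bool) (mr : List Int) (s' : List Bool) (mr' : List Int),
    seen.length = n → mr.length = n → n + 1 ≤ fuel + seen.count true → x ≠ -1 →
    (∀ i, i < n → mg mr i = x → sg seen i = true) →
    (∀ v : Int, v ≠ -1 → mr.count v ≤ 1) →
    dfsA pos fuel x seen mr = (true, s', mr') →
    s'.length = n ∧ mr'.length = n ∧ (∀ i, sg seen i = true → sg s' i = true) ∧
    (∀ i, mg mr' i ≠ mg mr i → i < n ∧ sg seen i = false ∧ mg mr' i ≠ -1 ∧ edgeP A B (mg mr' i) i) ∧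
    mr'.count x = mr.count x + 1 ∧
    (∀ z : Int, z ≠ x → z ≠ -1 → mr'.count z = mr.count z)

def SuccL (A B : List Int) (pos : PySem.Dict Int (List Nat)) (n fuel : Nat) : Prop :=
  ∀ (l : List Nat) (x : Int) (seen : List Bool) (mr : List Int) (s' : List Bool) (mr' : List Int),
    (∀ i ∈ l, i ∈ pos.getD x []) →
    seen.length = n → mr.length = n → n + 1 ≤ fuel + 1 + seen.count true → x ≠ -1 →
    (∀ i, i < n → mg mr i = x → sg seen i = true) →
    (∀ v : Int, v ≠ -1 → mr.count v ≤ 1) →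
    dfsL pos fuel l x seen mr = (true, s', mr') →
    s'.length = n ∧ mr'.length = n ∧ (∀ i, sg seen i = true → sg s' i = true) ∧
    (∀ i, mg mr' i ≠ mg mr i → i < n ∧ sg seen i = false ∧ mg mr' i ≠ -1 ∧ edgeP A B (mg mr' i) i) ∧
    mr'.count x = mr.count x + 1 ∧
    (∀ z : Int, z ≠ x → z ≠ -1 → mr'.count z = mr.count z)

lemma succA_zero (A B : List Int) (pos : PySem.Dict Int (List Nat)) (n : Nat) :
    SuccA A B pos n 0 := by
  intro x seen mr s' mr' _ _ hfuel _ _ _ hrun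
  have := List.count_le_length (l := seen) (a := true)
  omega

lemma succL_step (A B : List Int) (pos : PySem.Dict Int (List Nat)) (n fuel : Nat)
    (hpos : ∀ (v : Int) (i : Nat), i ∈ pos.getD v [] → i < n ∧ edgeP A B v i)
    (hA : SuccA A B pos n fuel) (hF : FailA pos n fuel) : SuccL A B pos n fuel := by
  intro l
  induction l with
  | nil =>
    intro x seen mr s' mr' _ _ _ _ _ _ _ hrun
    rw [dfsL] at hrun
    exact absurd (congrArg Prod.fst hrun) (by simp)
  | cons i rest ih =>
    intro x seen mr s' mr' hl hslen hmlen hfuel hx hMx hinj hrun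
    obtain ⟨hin, hedge⟩ := hpos x i (hl i (by simp))
    by_cases hseen : sg seen i = true
    · rw [dfsL] at hrun
      rw [if_pos (by exact hseen)] at hrun
      exact ih x seen mr s' mr' (fun j hj => hl j (by simp [hj])) hslen hmlen hfuel hx hMx hinj hrun
    · rw [dfsL] at hrun
      rw [if_neg (by simpa [sg] using hseen)] at hrun
      simp only [] at hrun
      have hcnt1 : (seen.set i true).count true = seen.count true + 1 :=
        count_true_set seen i (by omega) (by simpa using hseen)
      by_cases hfree : mg mr i = -1
      · rw [if_pos (by exact hfree)] at hrun
        obtain ⟨rfl, rfl⟩ : s' = seen.set i true ∧ mr' = mr.set i x :=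
          ⟨(congrArg (fun p => p.2.1) hrun).symm, (congrArg (fun p => p.2.2) hrun).symm⟩
        have hmi : mr[i] = (-1 : Int) := by rw [← mg_eq_getElem mr i (by omega)]; exact hfree
        refine ⟨by simp [hslen], by simp [hmlen], fun k hk => sg_set_mono seen i k hk, ?_, ?_, ?_⟩
        · intro k hk
          by_cases hki : k = i
          · subst hki
            refine ⟨hin, by simpa using hseen, ?_, ?_⟩
            · rw [mg_set_self mr k x (by omega)]; exact hx
            · rw [mg_set_self mr k x (by omega)]; exact hedge
          · exact absurd (mg_set_ne mr i k x hki) hk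
        · exact count_set_new mr i (by omega) x x (by rw [hmi]; omega) rfl
        · intro z hzx hz1
          exact count_set_keep mr i (by omega) x z (by rw [hmi]; omega) (by omega)
      · rw [if_neg (by exact hfree)] at hrun
        rcases hdfs : dfsA pos fuel (mr.getD i (-1)) (seen.set i true) mr with ⟨b2, s2, m2⟩
        rw [hdfs] at hrun
        cases b2
        · -- subcall failed: state unchanged, continue over rest
          simp only [] at hrun
          obtain ⟨hm2, hs2len, hmono2, _, _⟩ :=
            hF (mr.getD i (-1)) (seen.set i true) mr s2 m2 (by simp [hslen]) (by omega) hdfs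
          rw [hm2] at hrun
          have hcnt2 : (seen.set i true).count true ≤ s2.count true :=
            count_true_mono _ _ (by simp [hslen, hs2len]) hmono2
          have hmono1 : ∀ k, sg seen k = true → sg s2 k = true := fun k hk =>
            hmono2 k (sg_set_mono seen i k hk)
          obtain ⟨hs'len, hmr'len, hmono3, hc3, hc4, hc5⟩ :=
            ih x s2 mr s' mr' (fun j hj => hl j (by simp [hj])) hs2len hmlen (by omega) hx
              (fun k hk hmk => hmono1 k (hMx k hk hmk)) hinj hrun
          refine ⟨hs'len, hmr'len, fun k hk => hmono3 k (hmono1 k hk), ?_, hc4, hc5⟩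
          intro k hk
          obtain ⟨hk1, hk2, hk3, hk4⟩ := hc3 k hk
          refine ⟨hk1, ?_, hk3, hk4⟩
          by_cases hsk : sg seen k = true
          · exact absurd (hmono1 k hsk) (by simp [hk2])
          · simpa using hsk
        · -- subcall succeeded: augmenting path found; mr' = m2.set i x
          simp only [] at hrun
          have hzx : mg mr i ≠ x := fun h =>
            absurd (hMx i (by omega) h) (by simp [hseen])
          have hMz : ∀ k, k < n → mg mr k = mg mr i → sg (seen.set i true) k = true := by
            intro k hk hmk
            by_cases hki : k = i
            · subst hki; exact sg_set_self seen k (by omega)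
            · exfalso
              have := two_le_count mr (mg mr i) (-1) k i (by omega) (by omega) hki hmk rfl
              have := hinj (mg mr i) hfree
              omega
          obtain ⟨hs2len, hm2len, hmono2, hc3s, hc4s, hc5s⟩ :=
            hA (mr.getD i (-1)) (seen.set i true) mr s2 m2 (by simp [hslen]) hmlen (by omega)
              hfree hMz hinj hdfs
          have hm2i : mg m2 i = mg mr i := by
            by_contra hne
            obtain ⟨_, hfalse, _, _⟩ := hc3s i hne
            rw [sg_set_self seen i (by omega)] at hfalse
            exact absurd hfalse (by simp)
          have hm2ig : m2[i] = mg mr i := by rw [← mg_eq_getElem m2 i (by omega)]; exact hm2i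
          have hmono1 : ∀ k, sg seen k = true → sg s2 k = true := fun k hk =>
            hmono2 k (sg_set_mono seen i k hk)
          obtain ⟨rfl, rfl⟩ : s' = s2 ∧ mr' = m2.set i x :=
            ⟨(congrArg (fun p => p.2.1) hrun).symm, (congrArg (fun p => p.2.2) hrun).symm⟩
          refine ⟨hs2len, by simp [hm2len], hmono1, ?_, ?_, ?_⟩
          · intro k hk
            by_cases hki : k = i
            · subst hki
              rw [mg_set_self m2 k x (by omega)]
              exact ⟨by omega, by simpa using hseen, hx, hedge⟩
            · rw [mg_set_ne m2 i k x hki] at hk ⊢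
              obtain ⟨hk1, hk2, hk3, hk4⟩ := hc3s k hk
              rw [sg_set_ne seen i k hki] at hk2
              exact ⟨hk1, hk2, hk3, hk4⟩
          · have h1 : (m2.set i x).count x = m2.count x + 1 :=
              count_set_new m2 i (by omega) x x (by rw [hm2ig]; exact hzx) rfl
            have h2 : m2.count x = mr.count x := hc5s x (by exact fun h => hzx h.symm) hx
            omega
          · intro z hzx' hz1
            by_cases hzz : z = mg mr i
            · have h1 : (m2.set i x).count z + 1 = m2.count z :=
                count_set_drop m2 i (by omega) x z (by rw [hm2ig]; exact hzz.symm) (by exact fun h => hzx' h.symm)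
              have h2 : m2.count (mr.getD i (-1)) = mr.count (mr.getD i (-1)) + 1 := hc4s
              have hzz' : mg mr i = mr.getD i (-1) := rfl
              rw [hzz, hzz'] at h1 ⊢
              omega
            · have h1 : (m2.set i x).count z = m2.count z :=
                count_set_keep m2 i (by omega) x z (by rw [hm2ig]; exact fun h => hzz h.symm) (by exact fun h => hzx' h.symm)
              have h2 : m2.count z = mr.count z := hc5s z (by exact hzz) hz1
              omega

lemma succA_step (A B : List Int) (pos : PySem.Dict Int (List Nat)) (n fuel : Nat)
    (hL : SuccL A B pos n fuel) : SuccA A B pos n (fuel + 1) := by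
  intro x seen mr s' mr' hslen hmlen hfuel hx hMx hinj hrun
  rw [dfsA] at hrun
  by_cases hc : pos.contains x = true
  · rw [if_pos hc] at hrun
    exact hL (pos.getD x []) x seen mr s' mr' (fun i hi => hi) hslen hmlen (by omega) hx hMx hinj hrun
  · rw [if_neg hc] at hrun
    exact absurd (congrArg Prod.fst hrun) (by simp)

lemma succSpec (A B : List Int) (pos : PySem.Dict Int (List Nat)) (n : Nat)
    (hpos : ∀ (v : Int) (i : Nat), i ∈ pos.getD v [] → i < n ∧ edgeP A B v i) :
    ∀ fuel, SuccA A B pos n fuel ∧ SuccL A B pos n fuel := by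
  have hposF : ∀ (v : Int) (i : Nat), i ∈ pos.getD v [] → i < n := fun v i hi => (hpos v i hi).1
  intro fuel
  induction fuel with
  | zero =>
    exact ⟨succA_zero A B pos n,
      succL_step A B pos n 0 hpos (succA_zero A B pos n) (failSpec pos n hposF 0).1⟩
  | succ fuel ih =>
    have hA := succA_step A B pos n fuel ih.2
    exact ⟨hA, succL_step A B pos n (fuel + 1) hpos hA (failSpec pos n hposF (fuel + 1)).1⟩
def forcedP (A B : List Int) (v : Int) : Prop :=
  ∃ i, i < A.length ∧ A.getD i 0 = v ∧ B.getD i 0 = v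

def fwit (A B : List Int) (v : Int) : Nat :=
  ((List.range A.length).find? (fun i => A.getD i 0 == v && B.getD i 0 == v)).getD 0

lemma fwit_spec (A B : List Int) (v : Int) (h : forcedP A B v) :
    fwit A B v < A.length ∧ A.getD (fwit A B v) 0 = v ∧ B.getD (fwit A B v) 0 = v := by
  obtain ⟨i, hi, ha, hb⟩ := h
  rcases hf : (List.range A.length).find? (fun i => A.getD i 0 == v && B.getD i 0 == v) with _ | j
  · rw [List.find?_eq_none] at hf
    exact absurd (by simp only [Bool.and_eq_true, beq_iff_eq]; exact ⟨ha, hb⟩ : (A.getD i 0 == v && B.getD i 0 == v) = true)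
      (by simpa using hf i (by simpa using hi))
  · have hmem := List.mem_of_find?_eq_some hf
    have hpred := List.find?_some hf
    simp only [Bool.and_eq_true, beq_iff_eq] at hpred
    have : fwit A B v = j := by unfold fwit; rw [hf]; rfl
    rw [this]
    exact ⟨by simpa using hmem, hpred.1, hpred.2⟩

def InvP (A B : List Int) (n : Nat) (mr : List Int) (x : Int) : Prop :=
  mr.length = n ∧
  (∀ i, i < n → mg mr i = -1 ∨ (1 ≤ mg mr i ∧ mg mr i < x ∧ edgeP A B (mg mr i) i)) ∧
  (∀ v : Int, v ≠ -1 → mr.count v ≤ 1) ∧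
  (∀ y : Int, 1 ≤ y → y < x → y ∈ mr)

lemma dfs_top_true (A B : List Int) (pos : PySem.Dict Int (List Nat)) (n : Nat)
    (hpos : ∀ (v : Int) (i : Nat), i ∈ pos.getD v [] → i < n ∧ edgeP A B v i)
    (hwit : ∀ v : Int, 0 < v → forcedP A B v → fwit A B v ∈ pos.getD v [])
    (x : Int) (mr : List Int) (hx : 1 ≤ x)
    (hfa : ∀ y : Int, 1 ≤ y → y < x → forcedP A B y) (hfx : forcedP A B x)
    (hInv : InvP A B n mr x) :
    (dfsA pos (n + 1) x (List.replicate n false) mr).1 = true := by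
  obtain ⟨hlen, hrange, hinj, hcov⟩ := hInv
  rcases hdfs : dfsA pos (n + 1) x (List.replicate n false) mr with ⟨b, s', mr'⟩
  cases b
  · exfalso
    obtain ⟨hmr', hs'len, _, hposx, hclose⟩ :=
      (failSpec pos n (fun v i hi => (hpos v i hi).1) (n + 1)).1 x (List.replicate n false)
        mr s' mr' (by simp) (by omega) hdfs
    have hclose' : ∀ i, sg s' i = true →
        mg mr i ≠ -1 ∧ ∀ j ∈ pos.getD (mg mr i) [], sg s' j = true := by
      intro i hi
      rcases hclose i hi with h | h
      · rw [sg_replicate] at h; exact absurd h (by simp)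
      · exact h
    classical
    set S : Finset ℕ := (Finset.range n).filter (fun i => sg s' i = true) with hS
    set L : Finset ℤ := S.image (mg mr) with hL
    have hmemS : ∀ i, i ∈ S ↔ i < n ∧ sg s' i = true := by
      intro i; simp [hS, Finset.mem_filter]
    have hLbound : ∀ i ∈ S, 1 ≤ mg mr i ∧ mg mr i < x := by
      intro i hi
      rw [hmemS] at hi
      rcases hrange i hi.1 with h | h
      · exact absurd h (hclose' i hi.2).1
      · exact ⟨h.1, h.2.1⟩
    have hW : ∀ v ∈ insert x L, fwit A B v ∈ S := by
      intro v hv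
      rcases Finset.mem_insert.mp hv with rfl | hvL
      · have hf := hwit v (by omega) hfx
        rw [hmemS]
        exact ⟨(hpos v _ hf).1, hposx _ hf⟩
      · obtain ⟨i, hiS, hiv⟩ := Finset.mem_image.mp hvL
        obtain ⟨hb1, hb2⟩ := hLbound i hiS
        have hforced : forcedP A B v := hfa v (by omega) (by omega)
        have hf := hwit v (by omega) hforced
        rw [hmemS]
        refine ⟨(hpos v _ hf).1, ?_⟩
        have := (hclose' i ((hmemS i).mp hiS).2).2
        rw [hiv] at this
        exact this _ hf
    have hWinj : Set.InjOn (fwit A B) (insert x L : Finset ℤ) := by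
      intro u hu w hw heq
      simp only [Finset.coe_insert, Set.mem_insert_iff, Finset.mem_coe] at hu hw
      have hfu : forcedP A B u := by
        rcases hu with rfl | hu; · exact hfx
        · obtain ⟨i, hiS, hiv⟩ := Finset.mem_image.mp hu
          obtain ⟨hb1, hb2⟩ := hLbound i hiS
          exact hfa u (by omega) (by omega)
      have hfw : forcedP A B w := by
        rcases hw with rfl | hw; · exact hfx
        · obtain ⟨i, hiS, hiv⟩ := Finset.mem_image.mp hw
          obtain ⟨hb1, hb2⟩ := hLbound i hiS
          exact hfa w (by omega) (by omega)
      have h1 := (fwit_spec A B u hfu).2.1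
      have h2 := (fwit_spec A B w hfw).2.1
      rw [← h1, ← h2, heq]
    have hxL : x ∉ L := by
      intro hmem
      obtain ⟨i, hiS, hiv⟩ := Finset.mem_image.mp hmem
      obtain ⟨_, hb2⟩ := hLbound i hiS
      omega
    have hginj : Set.InjOn (mg mr) (S : Set ℕ) := by
      intro i hi j hj heq
      simp only [Finset.mem_coe] at hi hj
      by_contra hne
      have hne1 := (hclose' i ((hmemS i).mp hi).2).1
      have h2c := two_le_count mr (mg mr i) (-1) i j (by rw [hlen]; exact ((hmemS i).mp hi).1)
        (by rw [hlen]; exact ((hmemS j).mp hj).1) hne rfl heq.symm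
      have := hinj (mg mr i) hne1
      omega
    have h1 : (insert x L).card ≤ S.card :=
      Finset.card_le_card_of_injOn (fwit A B) hW hWinj
    have h2 : L.card = S.card := Finset.card_image_of_injOn hginj
    have h3 : (insert x L).card = L.card + 1 := Finset.card_insert_of_notMem hxL
    omega
  · rfl

lemma Inv_step (A B : List Int) (n : Nat) (mr mr' : List Int) (x : Int) (hx : 1 ≤ x)
    (hInv : InvP A B n mr x) (hmr'len : mr'.length = n)
    (hc3 : ∀ i, mg mr' i ≠ mg mr i → mg mr' i ≠ -1 ∧ edgeP A B (mg mr' i) i)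
    (hc4 : mr'.count x = mr.count x + 1)
    (hc5 : ∀ z : Int, z ≠ x → z ≠ -1 → mr'.count z = mr.count z) :
    InvP A B n mr' (x + 1) := by
  obtain ⟨hlen, hrange, hinj, hcov⟩ := hInv
  have hcx : mr.count x = 0 := by
    rw [List.count_eq_zero]
    intro hmem
    obtain ⟨i, hi, hvi⟩ := List.mem_iff_getElem.mp hmem
    have hmg : mg mr i = x := by rw [mg_eq_getElem mr i hi, hvi]
    rcases hrange i (by omega) with h | h
    · omega
    · omega
  refine ⟨hmr'len, ?_, ?_, ?_⟩
  · intro i hi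
    by_cases hch : mg mr' i = mg mr i
    · rw [hch]
      rcases hrange i hi with h | h
      · exact Or.inl h
      · exact Or.inr ⟨h.1, by omega, h.2.2⟩
    · obtain ⟨hne1, hedge⟩ := hc3 i hch
      right
      by_cases hvx : mg mr' i = x
      · exact ⟨by omega, by omega, hedge⟩
      · have hvmem : mg mr' i ∈ mr' := by
          rw [mg_eq_getElem mr' i (by omega)]
          exact List.getElem_mem _
        have hcnt1 : 0 < mr'.count (mg mr' i) := List.count_pos_iff.mpr hvmem
        rw [hc5 _ hvx hne1] at hcnt1
        obtain ⟨j, hj, hvj⟩ := List.mem_iff_getElem.mp (List.count_pos_iff.mp hcnt1)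
        have hmgj : mg mr j = mg mr' i := by rw [mg_eq_getElem mr j hj, hvj]
        rcases hrange j (by omega) with h | h
        · omega
        · exact ⟨by omega, by omega, hedge⟩
  · intro v hv
    by_cases hvx : v = x
    · subst hvx; omega
    · rw [hc5 v hvx hv]; exact hinj v hv
  · intro y h1 h2
    by_cases hyx : y = x
    · subst hyx
      exact List.count_pos_iff.mp (by omega)
    · have : mr'.count y = mr.count y := hc5 y hyx (by omega)
      have := List.count_pos_iff.mpr (hcov y h1 (by omega))
      exact List.count_pos_iff.mp (by omega)
lemma buildPos_pos_facts (A B : List Int) :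
    ∀ (v : Int) (i : Nat), i ∈ (buildPos A B).getD v [] → i < A.length ∧ edgeP A B v i := by
  intro v i hi
  rw [mem_buildPos] at hi
  obtain ⟨h1, h2⟩ := hi
  simp only [predB, Bool.and_eq_true, Bool.or_eq_true, Bool.not_eq_true', beq_iff_eq,
    beq_eq_false_iff_ne, decide_eq_true_eq] at h2
  refine ⟨h1, ?_⟩
  rcases h2.2 with h | h
  · exact Or.inl h
  · exact Or.inr h.1

lemma buildPos_wit (A B : List Int) :
    ∀ v : Int, 0 < v → forcedP A B v → fwit A B v ∈ (buildPos A B).getD v [] := by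
  intro v hv hf
  obtain ⟨hlt, ha, hb⟩ := fwit_spec A B v hf
  rw [mem_buildPos]
  refine ⟨hlt, ?_⟩
  simp only [predB, Bool.and_eq_true, Bool.or_eq_true, beq_iff_eq, decide_eq_true_eq]
  exact ⟨hv, Or.inl ha⟩

lemma mg_replicate (n i : Nat) : mg (List.replicate n (-1)) i = -1 := by
  simp [mg, List.getD]

lemma InvP_init (A B : List Int) (n : Nat) : InvP A B n (List.replicate n (-1)) 1 := by
  refine ⟨by simp, fun i _ => Or.inl (mg_replicate n i), fun v hv => ?_, fun y h1 h2 => by omega⟩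
  have : v ∉ List.replicate n (-1 : Int) := by
    intro h
    exact hv (List.eq_of_mem_replicate h)
  rw [← List.count_eq_zero] at this
  omega

lemma coverGo_true (A B : List Int) (pos : PySem.Dict Int (List Nat)) (n : Nat)
    (hpos : ∀ (v : Int) (i : Nat), i ∈ pos.getD v [] → i < n ∧ edgeP A B v i)
    (hwit : ∀ v : Int, 0 < v → forcedP A B v → fwit A B v ∈ pos.getD v [])
    (M : Int) (hfa : ∀ y : Int, 1 ≤ y → y < M → forcedP A B y) :
    ∀ (k : Nat) (x : Int) (mr : List Int), x = M - k → 1 ≤ x → InvP A B n mr x →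
      canCoverGo pos n (PySem.List.pyRange x M 1) mr = true := by
  intro k
  induction k with
  | zero =>
    intro x mr hxk hx1 hInv
    rw [PySem.List.pyRange_one_eq_nil (by omega)]
    simp [canCoverGo]
  | succ k ih =>
    intro x mr hxk hx1 hInv
    rw [PySem.List.pyRange_one_cons (by omega)]
    have hfx : forcedP A B x := hfa x hx1 (by omega)
    have htop := dfs_top_true A B pos n hpos hwit x mr hx1
      (fun y hy1 hy2 => hfa y hy1 (by omega)) hfx hInv
    rcases hdfs : dfsA pos (n + 1) x (List.replicate n false) mr with ⟨b, s', mr'⟩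
    rw [hdfs] at htop
    cases b
    · simp at htop
    · obtain ⟨hlen, hrange, hinj, hcov⟩ := hInv
      obtain ⟨hs'len, hmr'len, _, hc3, hc4, hc5⟩ :=
        (succSpec A B pos n hpos (n + 1)).1 x (List.replicate n false) mr s' mr'
          (by simp) hlen (by simp) (by omega)
          (fun i hi hmg => by
            exfalso
            rcases hrange i hi with h | h <;> omega)
          hinj hdfs
      have hInv' := Inv_step A B n mr mr' x hx1 ⟨hlen, hrange, hinj, hcov⟩ hmr'len
        (fun i hi => ⟨(hc3 i hi).2.2.1, (hc3 i hi).2.2.2⟩) hc4 hc5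
      simp only [canCoverGo]
      rw [hdfs]
      exact ih (x + 1) mr' (by omega) (by omega) hInv'

lemma hasForced_iff (A B : List Int) (m : Int) :
    hasForced A B m = true ↔ forcedP A B m := by
  unfold hasForced forcedP
  simp only [List.any_eq_true, List.mem_range, Bool.and_eq_true, beq_iff_eq]

lemma findMissing_M (A B : List Int) (M : Int)
    (hfa : ∀ y : Int, 1 ≤ y → y < M → forcedP A B y) :
    findMissing (buildPos A B) M = 0 := by
  unfold findMissing
  rw [List.find?_eq_none.mpr]
  intro x hx
  rw [PySem.List.mem_pyRange_one] at hx
  have hf : forcedP A B x := hfa x hx.1 hx.2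
  have hw := buildPos_wit A B x (by omega) hf
  have hne : (buildPos A B).getD x [] ≠ [] := fun h => by rw [h] at hw; exact absurd hw (by simp)
  have hcontains : (buildPos A B).contains x = true := by
    rw [buildPos_contains]
    rw [buildPos_getD] at hne
    simp [hne]
  simp [hcontains, hne, List.length_eq_zero_iff]

lemma solutionLoop_eq (A B : List Int) (M : Int)
    (hM1 : 1 ≤ M) (hMnf : ¬ forcedP A B M)
    (hMmin : ∀ y : Int, 1 ≤ y → y < M → forcedP A B y)
    (hcover : canCover A B (buildPos A B) M = true) :
    ∀ (fuel : Nat) (m : Int), 1 ≤ m → m ≤ M → M - m < fuel →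
      solutionLoop A B (buildPos A B) fuel m = M := by
  intro fuel
  induction fuel with
  | zero => intro m _ _ h; omega
  | succ fuel ih =>
    intro m hm1 hmM hfuel
    by_cases hmM' : m = M
    · subst hmM'
      rw [solutionLoop]
      rw [if_neg (by rw [hasForced_iff]; exact hMnf)]
      simp [findMissing_M A B m hMmin, hcover]
    · have hforced : forcedP A B m := hMmin m hm1 (by omega)
      rw [solutionLoop, if_pos (by rw [hasForced_iff]; exact hforced)]
      exact ih (m + 1) (by omega) (by omega) (by omega)

lemma mem_forcedOf (A B : List Int) (hPre : A.length ≤ B.length) (v : Int) :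
    v ∈ forcedOf A B ↔ forcedP A B v := by
  unfold forcedOf
  rw [PySem.Set.mem_ofList]
  simp only [List.mem_filterMap]
  constructor
  · rintro ⟨⟨a, b⟩, hmem, hab⟩
    obtain ⟨i, hi, hp⟩ := List.mem_iff_getElem.mp hmem
    rw [List.getElem_zip, Prod.mk.injEq] at hp
    obtain ⟨hpa, hpb⟩ := hp
    have hilen : i < A.length := by
      rw [List.length_zip] at hi; omega
    simp only at hab
    by_cases hcond : a = b
    · rw [if_pos (by exact beq_iff_eq.mpr hcond)] at hab
      have hav : a = v := by simpa using hab
      exact ⟨i, hilen, by rw [List.getD_eq_getElem A 0 hilen, hpa, hav],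
        by rw [List.getD_eq_getElem B 0 (by omega), hpb, ← hcond, hav]⟩
    · rw [if_neg (by simpa using hcond)] at hab
      exact absurd hab (by simp)
  · rintro ⟨i, hi, ha, hb⟩
    have hizip : i < (A.zip B).length := by
      rw [List.length_zip]; omega
    refine ⟨(A.zip B)[i], List.getElem_mem hizip, ?_⟩
    rw [List.getElem_zip]
    have hA : A[i] = v := by rw [← List.getD_eq_getElem A 0 hi]; exact ha
    have hB : B[i] = v := by rw [← List.getD_eq_getElem B 0 (by omega)]; exact hb
    simp [hA, hB]

lemma altLoop_eq (s : PySem.Set Int) (M : Int)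
    (hin : ∀ y : Int, 1 ≤ y → y < M → y ∈ s) (hout : M ∉ s) :
    ∀ (fuel : Nat) (m : Int), 1 ≤ m → m ≤ M → M - m < fuel → altLoop s fuel m = M := by
  intro fuel
  induction fuel with
  | zero => intro m _ _ h; omega
  | succ fuel ih =>
    intro m hm1 hmM hfuel
    by_cases hmM' : m = M
    · subst hmM'
      rw [altLoop, if_neg (fun h => hout ((PySem.Set.contains_iff s m).mp h))]
    · rw [altLoop, if_pos ((PySem.Set.contains_iff s m).mpr (hin m hm1 (by omega)))]
      exact ih (m + 1) (by omega) (by omega) (by omega)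

lemma solution_eq (A B : List Int) (hPre : A.length ≤ B.length) :
    solution A B = solution_alt A B := by
  classical
  -- some m in [1, len+1] is not forced (pigeonhole on the witnessing indices)
  have hex : ∃ m : Int, 1 ≤ m ∧ m ≤ (A.length : Int) + 1 ∧ ¬ forcedP A B m := by
    by_contra h
    simp only [not_exists, not_and, not_not] at h
    have hsubset : Finset.Icc (1 : ℤ) ((A.length : Int) + 1)
        ⊆ (Finset.range A.length).image (fun i => A.getD i 0) := by
      intro m hm
      rw [Finset.mem_Icc] at hm
      obtain ⟨i, hi, ha, _⟩ := h m hm.1 hm.2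
      exact Finset.mem_image.mpr ⟨i, Finset.mem_range.mpr hi, ha⟩
    have h1 := Finset.card_le_card hsubset
    have h2 := Finset.card_image_le (s := Finset.range A.length) (f := fun i => A.getD i 0)
    rw [Int.card_Icc] at h1
    simp only [Finset.card_range] at h1 h2
    omega
  obtain ⟨m0, hm01, hm0n, hm0nf⟩ := hex
  have hpex : ∃ k : Nat, hasForced A B ((k : Int) + 1) = false := by
    refine ⟨(m0 - 1).toNat, ?_⟩
    have hcast : (((m0 - 1).toNat : Int)) + 1 = m0 := by omega
    rw [hcast]
    cases h : hasForced A B m0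
    · rfl
    · exact absurd ((hasForced_iff A B m0).mp h) hm0nf
  set K := Nat.find hpex with hK
  set M : Int := (K : Int) + 1 with hM
  have hM1 : 1 ≤ M := by omega
  have hMnf : ¬ forcedP A B M := by
    intro hf
    have hspec := Nat.find_spec hpex
    rw [← hK, ← hM] at hspec
    rw [(hasForced_iff A B M).mpr hf] at hspec
    exact absurd hspec (by simp)
  have hMmin : ∀ y : Int, 1 ≤ y → y < M → forcedP A B y := by
    intro y h1 h2
    have hk : (y - 1).toNat < K := by omega
    have := Nat.find_min hpex hk
    have hcast : (((y - 1).toNat : Int)) + 1 = y := by omega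
    rw [hcast] at this
    cases h : hasForced A B y
    · exact absurd h this
    · exact (hasForced_iff A B y).mp h
  have hMle : M ≤ (A.length : Int) + 1 := by
    have : K ≤ (m0 - 1).toNat := Nat.find_min' hpex (by
      have hcast : (((m0 - 1).toNat : Int)) + 1 = m0 := by omega
      rw [hcast]
      cases h : hasForced A B m0
      · rfl
      · exact absurd ((hasForced_iff A B m0).mp h) hm0nf)
    omega
  have hcover : canCover A B (buildPos A B) M = true := by
    unfold canCover
    exact coverGo_true A B (buildPos A B) A.length (buildPos_pos_facts A B)
      (buildPos_wit A B) M hMmin (M - 1).toNat 1 (List.replicate A.length (-1))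
      (by omega) (by omega) (InvP_init A B A.length)
  -- A's side returns M
  have hA : solution A B = M := by
    unfold solution
    exact solutionLoop_eq A B M hM1 hMnf hMmin hcover (A.length + 1) 1 (by omega) (by omega)
      (by omega)
  -- B's side returns M
  have hB : solution_alt A B = M := by
    unfold solution_alt
    have hsub : ∀ y ∈ PySem.List.pyRange 1 M 1, y ∈ forcedOf A B := by
      intro y hy
      rw [PySem.List.mem_pyRange_one] at hy
      exact (mem_forcedOf A B hPre y).mpr (hMmin y hy.1 hy.2)
    have hlenb : (M - 1).toNat ≤ (forcedOf A B).length := by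
      have hnd := PySem.List.nodup_pyRange_one (a := (1 : Int)) (b := M)
      have := (hnd.subperm hsub).length_le
      rw [PySem.List.length_pyRange_one] at this
      omega
    exact altLoop_eq (forcedOf A B) M
      (fun y h1 h2 => (mem_forcedOf A B hPre y).mpr (hMmin y h1 h2))
      (fun hmem => hMnf ((mem_forcedOf A B hPre M).mp hmem))
      ((forcedOf A B).length + 1) 1 (by omega) (by omega) (by omega)
  rw [hA, hB]


-- ===== VERDICT (by name: the statement is the Claim_ definition above) =====
theorem solution_spec : Claim_equal_solution := by
  intro A B _ hpre
  unfold Spec_solution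
  exact solution_eq A B hpre
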